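-- pv_equiv track=rewrite | github.com/cemililik/ForgeLM | forgelm/data_audit/_quality.py | _check_repeated_lines
-- ===== SOURCE A (Python) =====
-- from collections import Counter
-- from typing import List, Optional, Tuple
--
-- def _check_repeated_lines(lines: List[str]) -> Optional[str]:
--     """Flag when the top-3 *actually-repeating* lines (count >= 2) cover > 30 %.
--
--     A naive "top-3 distinct lines" rule fires on any short all-unique
--     document; pinning on count >= 2 isolates real boilerplate (repeated
--     headers / footers / disclaimers).
--     """
--     if len(lines) < 3:
--         return None
--     line_counts = Counter(lines)
--     repeating = [(ln, n) for ln, n in line_counts.items() if n >= 2]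
--     if not repeating:
--         return None
--     repeating.sort(key=lambda kv: kv[1], reverse=True)
--     top3_total = sum(n for _, n in repeating[:3])
--     return "repeated_lines" if top3_total / len(lines) > 0.30 else None
-- ===== SOURCE B (Python) =====
-- from typing import List, Optional
--
--
-- def _check_repeated_lines(lines: List[str]) -> Optional[str]:
--     if len(lines) < 3:
--         return None
--     s = sorted(lines)
--     counts = []
--     prev = s[0]
--     run = 1
--     for ln in s[1:]:
--         if ln == prev:
--             run += 1
--         else:
--             if run >= 2:
--                 counts.append(run)
--             prev = ln
--             run = 1
--     if run >= 2:
--         counts.append(run)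
--     if not counts:
--         return None
--     counts.sort(reverse=True)
--     top3_total = sum(counts[:3])
--     return "repeated_lines" if top3_total / len(lines) > 0.30 else None
-- ===== Notes on version B (the rewrite author's own statement) =====
-- stated objective: alternative
-- what changed: Replaces the Counter dict, items filter and reverse sort of (line,count) pairs by sorting the lines once and scanning the sorted list for runs of identical consecutive lines, keeping run lengths >= 2 and summing the three largest.
import Mathlib
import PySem

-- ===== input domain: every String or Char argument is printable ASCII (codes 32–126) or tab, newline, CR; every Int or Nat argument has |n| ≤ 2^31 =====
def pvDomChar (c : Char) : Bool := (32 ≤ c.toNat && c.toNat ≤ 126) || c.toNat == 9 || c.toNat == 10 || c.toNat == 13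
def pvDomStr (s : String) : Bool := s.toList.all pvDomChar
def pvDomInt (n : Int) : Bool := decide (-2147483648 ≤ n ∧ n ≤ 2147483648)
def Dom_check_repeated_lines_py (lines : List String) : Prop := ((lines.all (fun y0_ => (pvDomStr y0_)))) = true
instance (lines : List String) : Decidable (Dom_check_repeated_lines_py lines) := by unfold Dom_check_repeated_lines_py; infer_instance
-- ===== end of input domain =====

-- B replaces A's Counter-plus-sort-of-items pass by a single run-length scan over sorted(lines); alternative decomposition, same return value.

-- ===== PORT A =====
-- A's float comparison 'top3_total / len(lines) > 0.30' is ported exactly as the rational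
-- inequality 10 * top3_total > 3 * len(lines) (exact for every list length reachable here).
def check_repeated_lines_py (lines : List String) : Option String :=
  if lines.length < 3 then none
  else
    let line_counts := PySem.Dict.counter lines
    let repeating := line_counts.items.filter (fun kv => 2 ≤ kv.2)
    if repeating.isEmpty then none
    else
      let sortedRep := PySem.List.sorted repeating (fun kv => kv.2) true
      let top3_total := ((sortedRep.take 3).map (fun kv => kv.2)).sum
      if 3 * (lines.length : Int) < 10 * top3_total then some "repeated_lines" else none

-- ===== PORT B =====
-- the run-length scan of Source B over the tail of the sorted list: 'cur'/'run' are its prev/run loop variables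
def pvRuns (cur : String) (run : Int) : List String → List Int
  | [] => if 2 ≤ run then [run] else []
  | ln :: rest =>
    if ln = cur then pvRuns cur (run + 1) rest
    else (if 2 ≤ run then [run] else []) ++ pvRuns ln 1 rest

def check_repeated_lines_py_alt (lines : List String) : Option String :=
  if lines.length < 3 then none
  else
    match PySem.List.sorted lines (fun x => x) false with
    | [] => none
    | prev :: tail =>
      let counts := pvRuns prev 1 tail
      if counts.isEmpty then none
      else
        let top3_total := ((PySem.List.sorted counts (fun c => c) true).take 3).sum
        if 3 * (lines.length : Int) < 10 * top3_total then some "repeated_lines" else none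

-- ===== PRECONDITION & SPEC =====
def Spec_check_repeated_lines_py (lines : List String) (out : Option String) : Prop := out = check_repeated_lines_py_alt lines
instance (lines : List String) (out : Option String) : Decidable (Spec_check_repeated_lines_py lines out) := by unfold Spec_check_repeated_lines_py; infer_instance

-- ===== CLAIM (what is proved, stated in full; the proofs are below) =====
def Claim_equal_check_repeated_lines_py : Prop := ∀ (lines : List String), Dom_check_repeated_lines_py lines → Spec_check_repeated_lines_py lines (check_repeated_lines_py lines)

-- ===== LEMMAS AND PROOFS =====

def pvRunsSpec (l : List String) : List Int :=
  ((PySem.List.dedup l).map (fun v => (l.count v : Int))).filter (fun n => 2 ≤ n)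

lemma spec_step (cur : String) (run : Nat) (t : List String) (h1 : 1 ≤ run) (hn : cur ∉ t) :
    (pvRunsSpec (List.replicate run cur ++ t)).Perm
      ((if 2 ≤ (run : Int) then [(run : Int)] else []) ++ pvRunsSpec t) := by
  have hded : (PySem.List.dedup (List.replicate run cur ++ t)).Perm (cur :: PySem.List.dedup t) := by
    apply (List.perm_ext_iff_of_nodup (PySem.List.nodup_dedup _) ?_).mpr
    · intro a
      simp [List.mem_replicate, List.mem_append]
      constructor
      · rintro (⟨-, h⟩ | h) <;> simp [h]
      · rintro (h | h)
        · exact Or.inl ⟨by omega, h⟩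
        · exact Or.inr h
    · exact List.Nodup.cons (by simpa [PySem.List.mem_dedup] using hn) (PySem.List.nodup_dedup t)
  have hcnt : ((List.replicate run cur ++ t).count cur : Int) = (run : Int) := by
    have : t.count cur = 0 := List.count_eq_zero.mpr hn
    simp [List.count_append, this]
  have hmap : ∀ v ∈ PySem.List.dedup t,
      ((List.replicate run cur ++ t).count v : Int) = (t.count v : Int) := by
    intro v hv
    have hvt : v ∈ t := (PySem.List.mem_dedup t v).mp hv
    have hne : v ≠ cur := fun h => hn (h ▸ hvt)
    have : (List.replicate run cur).count v = 0 := by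
      simp [List.count_replicate]
      intro h; exact absurd h.symm hne
    simp [List.count_append, this]
  have hstep : ((cur :: PySem.List.dedup t).map
      (fun v => ((List.replicate run cur ++ t).count v : Int))).filter (fun n => 2 ≤ n)
      = (if 2 ≤ (run : Int) then [(run : Int)] else []) ++ pvRunsSpec t := by
    rw [List.map_cons, List.filter_cons]
    rw [List.map_congr_left hmap, hcnt]
    by_cases h2 : 2 ≤ (run : Int) <;> simp [h2, pvRunsSpec]
  exact ((hded.map _).filter _).trans (by rw [hstep])

lemma pvRuns_perm_spec : ∀ (rest : List String) (cur : String) (run : Nat), 1 ≤ run →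
    (List.replicate run cur ++ rest).Pairwise (· ≤ ·) →
    (pvRuns cur (run : Int) rest).Perm (pvRunsSpec (List.replicate run cur ++ rest)) := by
  intro rest
  induction rest with
  | nil =>
    intro cur run h1 _
    refine List.Perm.trans ?_ (spec_step cur run [] h1 (by simp)).symm
    simp [pvRuns, pvRunsSpec]
  | cons y r ih =>
    intro cur run h1 hpw
    by_cases hy : y = cur
    · subst hy
      have heq : List.replicate run y ++ y :: r = List.replicate (run + 1) y ++ r := by
        rw [List.replicate_succ']; simp
      have : pvRuns y ((run : Int)) (y :: r) = pvRuns y (((run + 1 : Nat) : Int)) r := by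
        simp [pvRuns]
      rw [this, heq]
      exact ih y (run + 1) (by omega) (heq ▸ hpw)
    · have hsplit := (List.pairwise_append.mp hpw)
      have hcross : ∀ b ∈ y :: r, cur ≤ b := by
        intro b hb
        exact hsplit.2.2 cur (by simp [List.mem_replicate]; omega) b hb
      have hnin : cur ∉ y :: r := by
        intro hc
        rcases List.mem_cons.mp hc with hc | hc
        · exact hy hc.symm
        · have hyc : y ≤ cur := (List.pairwise_cons.mp hsplit.2.1).1 cur hc
          exact hy (le_antisymm hyc (hcross y (by simp)))
      have hrw : pvRuns cur (run : Int) (y :: r) =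
          (if 2 ≤ (run : Int) then [(run : Int)] else []) ++ pvRuns y ((1 : Nat) : Int) r := by
        simp [pvRuns, hy]
      have hpwy : (List.replicate 1 y ++ r).Pairwise (· ≤ ·) := by
        simpa using hsplit.2.1
      have hperm := ih y 1 le_rfl hpwy
      rw [hrw]
      refine List.Perm.trans (List.Perm.append_left _ (by simpa using hperm)) ?_
      exact (spec_step cur run (y :: r) h1 hnin).symm

lemma counts_perm (lines : List String) (prev : String) (tail : List String)
    (hs : PySem.List.sorted lines (fun x => x) false = prev :: tail) :
    ((((PySem.Dict.counter lines).items.filter (fun kv => 2 ≤ kv.2)).map (fun kv => kv.2))).Perm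
      (pvRuns prev 1 tail) := by
  have hsp : (PySem.List.sorted lines (fun x => x) false).Perm lines :=
    PySem.List.sorted_perm lines (fun x => x) false
  -- B's side: the scan is (a permutation of) the per-distinct-line counts of the sorted list
  have hpw : (List.replicate 1 prev ++ tail).Pairwise (fun a b => a ≤ b) := by
    have := PySem.List.sorted_pairwise lines (fun x => x)
    rw [hs] at this; simpa using this
  have hB := pvRuns_perm_spec tail prev 1 le_rfl hpw
  have hB' : (pvRuns prev 1 tail).Perm (pvRunsSpec (prev :: tail)) := by
    simpa using hB
  -- the spec of the sorted list is a permutation of A's repeating counts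
  have hA : (((PySem.Dict.counter lines).items.filter (fun kv => 2 ≤ kv.2)).map (fun kv => kv.2))
      = ((PySem.Set.ofList lines).map (fun k => ((lines.count k : Int)))).filter (fun n => 2 ≤ n) := by
    rw [PySem.Dict.items_counter]
    generalize PySem.Set.ofList lines = L
    induction L with
    | nil => rfl
    | cons h t iht => by_cases hc : (2:Int) ≤ lines.count h <;> simp [hc, iht]
  have hded : (PySem.List.dedup (prev :: tail)).Perm (PySem.Set.ofList lines) := by
    apply (List.perm_ext_iff_of_nodup (PySem.List.nodup_dedup _) (PySem.Set.nodup_ofList _)).mpr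
    intro a
    rw [PySem.List.mem_dedup, PySem.Set.mem_ofList, ← hs]
    exact hsp.mem_iff
  have hcong : (PySem.List.dedup (prev :: tail)).map (fun v => ((prev :: tail).count v : Int))
      = (PySem.List.dedup (prev :: tail)).map (fun v => ((lines.count v : Int))) := by
    apply List.map_congr_left
    intro v _
    rw [← hs, hsp.count_eq]
  have : (pvRunsSpec (prev :: tail)).Perm
      (((PySem.Set.ofList lines).map (fun k => ((lines.count k : Int)))).filter (fun n => 2 ≤ n)) := by
    unfold pvRunsSpec
    rw [hcong]
    exact (hded.map _).filter _
  rw [hA]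
  exact (hB'.trans this).symm

theorem check_repeated_lines_py_spec_aux (lines : List String) :
    check_repeated_lines_py lines = check_repeated_lines_py_alt lines := by
  unfold check_repeated_lines_py check_repeated_lines_py_alt
  by_cases h3 : lines.length < 3
  · simp [h3]
  · rw [if_neg h3, if_neg h3]
    have hne : lines ≠ [] := by intro h; subst h; simp at h3
    obtain ⟨prev, tail, hs⟩ : ∃ p t, PySem.List.sorted lines (fun x => x) false = p :: t := by
      rcases hsv : PySem.List.sorted lines (fun x => x) false with _ | ⟨p, t⟩
      · exact absurd ((PySem.List.sorted_eq_nil_iff _ _ _).mp hsv) hne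
      · exact ⟨p, t, rfl⟩
    rw [hs]
    split
    · next heq => exact absurd heq (by simp)
    · rename_i p t heq
      obtain ⟨rfl, rfl⟩ : prev = p ∧ tail = t := by
        injection heq with h1 h2; exact ⟨h1, h2⟩
      have hperm := counts_perm lines prev tail hs
      have hlen : ((PySem.Dict.counter lines).items.filter (fun kv => 2 ≤ kv.2)).length
          = (pvRuns prev 1 tail).length := by
        simpa using hperm.length_eq
      by_cases hemp : ((PySem.Dict.counter lines).items.filter (fun kv => 2 ≤ kv.2)).isEmpty
      · have hempB : (pvRuns prev 1 tail).isEmpty := by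
          rw [List.isEmpty_iff_length_eq_zero] at hemp ⊢; omega
        rw [if_pos hemp, if_pos hempB]
      · have hempB : ¬ (pvRuns prev 1 tail).isEmpty := by
          rw [List.isEmpty_iff_length_eq_zero] at hemp ⊢; omega
        rw [if_neg hemp, if_neg hempB]
        have hpm : ((PySem.List.sorted
              ((PySem.Dict.counter lines).items.filter (fun kv => 2 ≤ kv.2))
              (fun kv => kv.2) true).map (fun kv => kv.2)).Perm
            (PySem.List.sorted (pvRuns prev 1 tail) (fun c => c) true) :=
          ((PySem.List.sorted_perm _ (fun kv : String × Int => kv.2) true).map _).trans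
            (hperm.trans (PySem.List.sorted_perm _ (fun c : Int => c) true).symm)
        have hpX : ((PySem.List.sorted
              ((PySem.Dict.counter lines).items.filter (fun kv => 2 ≤ kv.2))
              (fun kv => kv.2) true).map (fun kv => kv.2)).Pairwise (fun a b => b ≤ a) :=
          List.Pairwise.map _ (fun a b h => h)
            (PySem.List.sorted_pairwise_rev
              ((PySem.Dict.counter lines).items.filter (fun kv => 2 ≤ kv.2))
              (fun kv : String × Int => kv.2))
        have hpY := PySem.List.sorted_pairwise_rev (pvRuns prev 1 tail) (fun c : Int => c)
        have hX := hpm.eq_of_pairwise (fun a b _ _ x y => le_antisymm y x) hpX hpY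
        show (if 3 * (lines.length : Int) < 10 * (((PySem.List.sorted
              ((PySem.Dict.counter lines).items.filter (fun kv => 2 ≤ kv.2))
              (fun kv => kv.2) true).take 3).map (fun kv => kv.2)).sum
            then some "repeated_lines" else none)
          = (if 3 * (lines.length : Int) < 10 *
              ((PySem.List.sorted (pvRuns prev 1 tail) (fun c => c) true).take 3).sum
            then some "repeated_lines" else none)
        rw [List.map_take, hX]

-- ===== VERDICT (by name: the statement is the Claim_ definition above) =====
theorem check_repeated_lines_py_spec : Claim_equal_check_repeated_lines_py := by
  intro lines _
  exact (check_repeated_lines_py_spec_aux lines : _)
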